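-- pv_equiv track=rewrite | github.com/sakshamkashyap/Projects | inference3.py | UnifyFact
-- ===== SOURCE A (Python) =====
-- def UnifyFact(goal, kb, thetax):
--     thetay=0
--     for i in range(len(goal)):
--         if goal[i] != kb[i]:
--             thetay = kb[i]
--             #goal[i] = kb[i]
--     if(thetay==0):
--         return thetax
--     return thetay
-- ===== SOURCE B (Python) =====
-- def UnifyFact(goal, kb, thetax):
--     # scan from the end: the first mismatch found is the last mismatch overall
--     for i in range(len(goal) - 1, -1, -1):
--         if goal[i] != kb[i]:
--             return kb[i]
--     return thetax
-- ===== Notes on version B (the rewrite author's own statement) =====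
-- stated objective: alternative
-- what changed: B scans the indices backwards and returns the first mismatching kb element immediately (which is A's last mismatch), eliminating A's accumulator variable and the int-0 sentinel test; it can stop early where A always walks the whole list.
import Mathlib
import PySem

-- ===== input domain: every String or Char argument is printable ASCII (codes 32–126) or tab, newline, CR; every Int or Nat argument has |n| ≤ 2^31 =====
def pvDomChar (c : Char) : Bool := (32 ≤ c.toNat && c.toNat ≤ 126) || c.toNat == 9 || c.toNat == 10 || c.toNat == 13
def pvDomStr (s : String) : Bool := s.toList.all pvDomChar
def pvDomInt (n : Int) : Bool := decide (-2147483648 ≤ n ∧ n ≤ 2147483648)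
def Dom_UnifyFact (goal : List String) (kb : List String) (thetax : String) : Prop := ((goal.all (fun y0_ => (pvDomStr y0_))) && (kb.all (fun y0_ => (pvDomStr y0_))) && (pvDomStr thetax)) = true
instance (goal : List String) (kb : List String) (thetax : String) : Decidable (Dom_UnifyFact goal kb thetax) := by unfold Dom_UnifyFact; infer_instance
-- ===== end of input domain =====

-- B replaces A's forward scan with an overwritten accumulator by a backward scan
-- that returns the first mismatch it meets (= A's last mismatch); same cost.

-- ===== PORT A =====
-- thetay : Option String plays Python's 'thetay' (none = the int sentinel 0; a
-- string is never == 0 in Python, so the final test is exactly the none-check).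
-- pyGet? = none would be Python's IndexError; Pre_ excludes those inputs.
def UnifyFact (goal : List String) (kb : List String) (thetax : String) : String :=
  let thetay := (PySem.List.pyRange 0 (goal.length : Int) 1).foldl
    (fun (th : Option String) (i : Int) =>
      match PySem.List.pyGet? goal i with
      | none => th
      | some g =>
        match PySem.List.pyGet? kb i with
        | none => th
        | some k => if g != k then some k else th) none
  match thetay with
  | none => thetax
  | some y => y

-- ===== PORT B =====
-- Source B's backward loop: first index (from the end) where goal[i] != kb[i] returns kb[i].
def pvScanBack (goal : List String) (kb : List String) : List Int → Option String
  | [] => none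
  | i :: rest =>
    match PySem.List.pyGet? goal i, PySem.List.pyGet? kb i with
    | some g, some k => if g != k then some k else pvScanBack goal kb rest
    | _, _ => pvScanBack goal kb rest

def UnifyFact_alt (goal : List String) (kb : List String) (thetax : String) : String :=
  (pvScanBack goal kb (PySem.List.pyRange ((goal.length : Int) - 1) (-1) (-1))).getD thetax

-- ===== PRECONDITION & SPEC =====
-- Python A indexes kb[i] for every i < len(goal), so it raises IndexError iff kb is
-- shorter than goal; Pre_ excludes exactly those inputs (B raises there too).
def Pre_UnifyFact (goal : List String) (kb : List String) (thetax : String) : Prop :=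
  goal.length ≤ kb.length
instance (goal : List String) (kb : List String) (thetax : String) : Decidable (Pre_UnifyFact goal kb thetax) := by unfold Pre_UnifyFact; infer_instance

def pvWitness_UnifyFact : List String × List String × String := (["a", "b"], ["a", "c"], "x")

def Spec_UnifyFact (goal : List String) (kb : List String) (thetax : String) (out : String) : Prop := out = UnifyFact_alt goal kb thetax
instance (goal : List String) (kb : List String) (thetax : String) (out : String) : Decidable (Spec_UnifyFact goal kb thetax out) := by unfold Spec_UnifyFact; infer_instance

-- ===== CLAIM (what is proved, stated in full; the proofs are below) =====
def Claim_equal_UnifyFact : Prop := ∀ (goal : List String) (kb : List String) (thetax : String), Dom_UnifyFact goal kb thetax → Pre_UnifyFact goal kb thetax → Spec_UnifyFact goal kb thetax (UnifyFact goal kb thetax)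

-- ===== LEMMAS AND PROOFS =====

theorem pvScanBack_append (goal kb : List String) (m m' : List Int) :
    pvScanBack goal kb (m ++ m') =
      match pvScanBack goal kb m with
      | some y => some y
      | none => pvScanBack goal kb m' := by
  induction m with
  | nil => simp [pvScanBack]
  | cons i rest ih =>
    simp only [List.cons_append, pvScanBack]
    cases hg : PySem.List.pyGet? goal i <;> cases hk : PySem.List.pyGet? kb i <;>
      simp [ih]
    split <;> simp

theorem foldl_eq_scanBack_reverse (goal kb : List String) :
    ∀ (l : List Int) (a : Option String),
      l.foldl (fun (th : Option String) (i : Int) =>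
        match PySem.List.pyGet? goal i with
        | none => th
        | some g =>
          match PySem.List.pyGet? kb i with
          | none => th
          | some k => if g != k then some k else th) a =
      match pvScanBack goal kb l.reverse with
      | some y => some y
      | none => a := by
  intro l
  induction l with
  | nil => intro a; simp [pvScanBack]
  | cons i rest ih =>
    intro a
    simp only [List.foldl_cons, List.reverse_cons, pvScanBack_append, ih]
    cases h : pvScanBack goal kb rest.reverse with
    | some y => rfl
    | none =>
      simp only [pvScanBack]
      cases hg : PySem.List.pyGet? goal i <;> cases hk : PySem.List.pyGet? kb i <;> simp
      split <;> simp

-- ===== VERDICT (by name: the statement is the Claim_ definition above) =====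
theorem UnifyFact_spec : Claim_equal_UnifyFact := by
  intro goal kb thetax _ _
  unfold Spec_UnifyFact UnifyFact UnifyFact_alt
  have hr : PySem.List.pyRange ((goal.length : Int) - 1) (-1) (-1)
      = (PySem.List.pyRange 0 (goal.length : Int) 1).reverse := by
    have := PySem.List.pyRange_neg_one_eq_reverse ((goal.length : Int) - 1) (-1)
    simpa using this
  rw [hr, foldl_eq_scanBack_reverse]
  cases pvScanBack goal kb (PySem.List.pyRange 0 (goal.length : Int) 1).reverse <;> rfl
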